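-- pv_equiv track=rewrite | github.com/kadragon/oop_python_ex | student_result/2019/01_number_baseball/baseball [2-1 이B].py | check
-- ===== SOURCE A (Python) =====
-- def check(numlist):   # 리스트를 받아 입력이 조건에 맞는지 검사한다. 조건에 맞지않는다면 False 를 리턴한다.
--     randnumlists = ['0', '1', '2', '3', '4', '5', '6', '7', '8', '9']  # 들어갈 수 있는 수들이 모두 들어있는 리스트
--
--     if len(numlist) != 3:  # 3개의 숫자가 입력되었는가부터 확인한다.
--         return False
--
--     for i in range(3):
--         iffind = -1  # 3개가 딱 들어왔다면 이제 그 셋이 숫자인지 체크해야한다.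
--         for q in range(len(randnumlists)):
--             if randnumlists[q] == numlist[i]:
--                 iffind = 1
--         if iffind < 0:  # 셋중 하나라도 숫자에 해당하지 않는다면 False를 반환한다.
--             return False
--
--     if numlist[0] == numlist[1] or numlist[1] == numlist[2] or numlist[0] == numlist[2] :
--         return False
--     return True
-- ===== SOURCE B (Python) =====
-- def check(numlist):
--     seen = []
--     for s in numlist:
--         if len(s) != 1 or not s.isdigit() or s in seen:
--             return False
--         seen.append(s)
--     return len(seen) == 3
-- ===== Notes on version B (the rewrite author's own statement) =====
-- stated objective: alternative
-- what changed: Replaced A's staged checks (length guard, nested sentinel scan over a digit list per element, then three pairwise equality comparisons) with a single left-to-right pass that keeps an accumulator of already-seen elements, rejects an element that is not a single digit character or repeats one seen before, and checks the length only at the end via the accumulator's size.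
import Mathlib
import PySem

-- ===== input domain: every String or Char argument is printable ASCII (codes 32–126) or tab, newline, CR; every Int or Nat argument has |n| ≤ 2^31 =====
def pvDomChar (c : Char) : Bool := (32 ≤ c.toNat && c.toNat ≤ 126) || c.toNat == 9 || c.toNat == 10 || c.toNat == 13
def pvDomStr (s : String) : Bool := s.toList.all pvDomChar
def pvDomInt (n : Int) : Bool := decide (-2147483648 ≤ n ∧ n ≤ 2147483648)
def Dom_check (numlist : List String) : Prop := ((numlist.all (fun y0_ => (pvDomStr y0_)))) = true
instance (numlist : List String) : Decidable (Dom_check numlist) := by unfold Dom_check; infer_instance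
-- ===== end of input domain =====

-- B replaces A's staged checks (length guard, nested digit-list scan, pairwise comparisons) with
-- one left-to-right pass over the input keeping a 'seen' accumulator, the length checked at the end.


-- ===== PORT A =====
def check (numlist : List String) : Bool :=
  let randnumlists : List String := ["0", "1", "2", "3", "4", "5", "6", "7", "8", "9"]
  if numlist.length ≠ 3 then false
  else if (List.range 3).any (fun i =>
      -- inner loop: iffind starts at -1, set to 1 whenever randnumlists[q] == numlist[i]
      (randnumlists.foldl (fun iffind q => if q == PySem.List.pyGetD numlist (i : Int) "" then (1 : Int) else iffind) (-1 : Int)) < 0)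
    then false
  else if PySem.List.pyGetD numlist 0 "" == PySem.List.pyGetD numlist 1 ""
       || PySem.List.pyGetD numlist 1 "" == PySem.List.pyGetD numlist 2 ""
       || PySem.List.pyGetD numlist 0 "" == PySem.List.pyGetD numlist 2 "" then false
  else true

-- ===== PORT B =====
-- the for-loop of Source B with its early returns, as structural recursion over the input,
-- carrying the 'seen' accumulator
def checkAltGo : List String → List String → Bool
  | [], seen => seen.length == 3
  | s :: rest, seen =>
    if PySem.Str.len s != 1 || !PySem.Str.strIsdigit s || seen.contains s then false
    else checkAltGo rest (seen ++ [s])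

def check_alt (numlist : List String) : Bool := checkAltGo numlist []

-- ===== PRECONDITION & SPEC =====
def Spec_check (numlist : List String) (out : Bool) : Prop := out = check_alt numlist
instance (numlist : List String) (out : Bool) : Decidable (Spec_check numlist out) := by unfold Spec_check; infer_instance

-- ===== CLAIM =====
def Claim_equal_check : Prop := ∀ (numlist : List String), Dom_check numlist → Spec_check numlist (check numlist)

-- ===== LEMMAS AND PROOFS =====

lemma char_toNat_inj {a b : Char} (h : a.toNat = b.toNat) : a = b := by
  apply Char.ext; exact UInt32.toNat_inj.mp h

-- a character is one of '0'..'9' exactly when Python's isdigit holds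
lemma char_digit (c : Char) : ((c == '0') || (c == '1') || (c == '2') || (c == '3') || (c == '4') || (c == '5') || (c == '6') || (c == '7') || (c == '8') || (c == '9')) = PySem.Chars.isdigit c := by
  rw [Bool.eq_iff_iff]
  simp only [PySem.Chars.isdigit, Bool.or_eq_true, beq_iff_eq, Bool.and_eq_true, decide_eq_true_eq]
  constructor
  · rintro (((((((((rfl|rfl)|rfl)|rfl)|rfl)|rfl)|rfl)|rfl)|rfl)|rfl) <;> exact ⟨by decide, by decide⟩
  · rintro ⟨h1, h2⟩
    have l1 : 48 ≤ c.toNat := by simpa [Char.le_def, UInt32.le_iff_toNat_le] using h1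
    have l2 : c.toNat ≤ 57 := by simpa [Char.le_def, UInt32.le_iff_toNat_le] using h2
    have hd : c.toNat = 48 ∨ c.toNat = 49 ∨ c.toNat = 50 ∨ c.toNat = 51 ∨ c.toNat = 52 ∨ c.toNat = 53 ∨ c.toNat = 54 ∨ c.toNat = 55 ∨ c.toNat = 56 ∨ c.toNat = 57 := by omega
    rcases hd with h|h|h|h|h|h|h|h|h|h <;> first
      | simp [show c = '0' from char_toNat_inj (by rw [h]; decide)]
      | simp [show c = '1' from char_toNat_inj (by rw [h]; decide)]
      | simp [show c = '2' from char_toNat_inj (by rw [h]; decide)]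
      | simp [show c = '3' from char_toNat_inj (by rw [h]; decide)]
      | simp [show c = '4' from char_toNat_inj (by rw [h]; decide)]
      | simp [show c = '5' from char_toNat_inj (by rw [h]; decide)]
      | simp [show c = '6' from char_toNat_inj (by rw [h]; decide)]
      | simp [show c = '7' from char_toNat_inj (by rw [h]; decide)]
      | simp [show c = '8' from char_toNat_inj (by rw [h]; decide)]
      | simp [show c = '9' from char_toNat_inj (by rw [h]; decide)]

-- characters lists / strings of A's digit list, via Python's isdigit
lemma chars_digit (l : List Char) :
    (l = ['0'] ∨ l = ['1'] ∨ l = ['2'] ∨ l = ['3'] ∨ l = ['4'] ∨ l = ['5'] ∨ l = ['6'] ∨ l = ['7'] ∨ l = ['8'] ∨ l = ['9'])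
      ↔ (l.length = 1 ∧ PySem.Chars.strIsdigit l = true) := by
  rcases l with _ | ⟨c, _ | ⟨d, ds⟩⟩
  · simp
  · constructor
    · rintro (h|h|h|h|h|h|h|h|h|h) <;> (injection h with h _; subst h) <;> exact ⟨rfl, by decide⟩
    · rintro ⟨-, h2⟩
      have hc : ((c == '0') || (c == '1') || (c == '2') || (c == '3') || (c == '4') || (c == '5') || (c == '6') || (c == '7') || (c == '8') || (c == '9')) = true := by
        rw [char_digit]
        simpa [PySem.Chars.strIsdigit] using h2
      simp only [Bool.or_eq_true, beq_iff_eq] at hc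
      rcases hc with (((((((((rfl|rfl)|rfl)|rfl)|rfl)|rfl)|rfl)|rfl)|rfl)|rfl) <;> simp
  · constructor
    · rintro (h|h|h|h|h|h|h|h|h|h) <;> simp at h
    · rintro ⟨h1, -⟩; simp at h1

lemma str_digit (s : String) :
    (["0", "1", "2", "3", "4", "5", "6", "7", "8", "9"] : List String).contains s
      = ((PySem.Str.len s == 1) && PySem.Str.strIsdigit s) := by
  rw [Bool.eq_iff_iff]
  have key : ∀ t : String, (s = t) ↔ (s.toList = t.toList) := fun t => String.toList_inj.symm
  simp only [List.contains_cons, List.contains_nil, Bool.or_eq_true, Bool.or_false, beq_iff_eq,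
    Bool.and_eq_true, PySem.Str.strIsdigit_eq, PySem.Str.len, key]
  rw [show ("0":String).toList = ['0'] from rfl, show ("1":String).toList = ['1'] from rfl,
    show ("2":String).toList = ['2'] from rfl, show ("3":String).toList = ['3'] from rfl,
    show ("4":String).toList = ['4'] from rfl, show ("5":String).toList = ['5'] from rfl,
    show ("6":String).toList = ['6'] from rfl, show ("7":String).toList = ['7'] from rfl,
    show ("8":String).toList = ['8'] from rfl, show ("9":String).toList = ['9'] from rfl,
    Nat.cast_eq_one]
  exact chars_digit s.toList

-- A's sentinel scan over the digit list computes membership.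
lemma scan_eq (rand : List String) (s : String) (acc : Int) :
    rand.foldl (fun iffind q => if q == s then (1 : Int) else iffind) acc
      = if rand.contains s then 1 else acc := by
  induction rand generalizing acc with
  | nil => simp
  | cons r rs ih =>
    simp only [List.foldl_cons]
    rw [ih]
    by_cases h : r = s
    · rcases h with rfl
      by_cases hm : r ∈ rs <;> simp [hm]
    · by_cases hm : s ∈ rs <;> simp [h, hm, Ne.symm h]

-- the sentinel value is negative exactly when the digit was not found
lemma ite_neg_lt (b : Bool) : ((if b then (1 : Int) else -1) < 0) = !b := by
  cases b <;> simp

-- B's pass returns false whenever the input cannot bring the accumulator to size 3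
lemma go_ne (l seen : List String) (h : seen.length + l.length ≠ 3) : checkAltGo l seen = false := by
  induction l generalizing seen with
  | nil =>
    simp only [checkAltGo, beq_eq_false_iff_ne, ne_eq]
    simp only [List.length_nil] at h
    omega
  | cons s rest ih =>
    simp only [checkAltGo]
    split
    · rfl
    · exact ih (seen ++ [s]) (by simp at h ⊢; omega)

-- ===== VERDICT (by name: the statement is the Claim_ definition above) =====
theorem check_spec : Claim_equal_check := by
  intro numlist _
  unfold Spec_check
  by_cases h3 : numlist.length = 3
  · rcases List.length_eq_three.mp h3 with ⟨a, b, c, rfl⟩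
    simp only [check, check_alt, checkAltGo, List.range, List.range.loop, List.any_cons,
      List.any_nil, scan_eq, ite_neg_lt, str_digit,
      PySem.List.pyGetD_natCast, PySem.List.pyGetD_ofNat']
    by_cases hDa : (PySem.Str.len a == 1 && PySem.Str.strIsdigit a) = true <;>
    by_cases hDb : (PySem.Str.len b == 1 && PySem.Str.strIsdigit b) = true <;>
    by_cases hDc : (PySem.Str.len c == 1 && PySem.Str.strIsdigit c) = true <;>
    by_cases hab : a = b <;> by_cases hbc : b = c <;> by_cases hac : a = c <;>
      simp [hDa, hDb, hDc, hab, hbc, hac, @eq_comm _ b a, @eq_comm _ c a, @eq_comm _ c b,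
        List.getD]
  · have hA : check numlist = false := by simp [check, h3]
    have hB : check_alt numlist = false := go_ne numlist [] (by simpa using h3)
    rw [hA, hB]
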